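-- pv_equiv track=rewrite | github.com/olliekod/Argus-public | scripts/tastytrade_option_chain_probe.py | _sample_symbols
-- ===== SOURCE A (Python) =====
-- from typing import Any
--
-- def _sample_symbols(contracts: list[dict[str, Any]]) -> tuple[str | None, str | None]:
--     def _valid(symbol: str | None) -> bool:
--         return bool(symbol) and str(symbol).lower() != "n/a"
--
--     call_symbol = next(
--         (
--             contract.get("option_symbol")
--             for contract in contracts
--             if contract.get("right") == "C" and _valid(contract.get("option_symbol"))
--         ),
--         None,
--     )
--     put_symbol = next(
--         (
--             contract.get("option_symbol")
--             for contract in contracts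
--             if contract.get("right") == "P" and _valid(contract.get("option_symbol"))
--         ),
--         None,
--     )
--     return call_symbol, put_symbol
-- ===== SOURCE B (Python) =====
-- def _sample_symbols(contracts):
--     def _valid(symbol):
--         return bool(symbol) and str(symbol).lower() != "n/a"
--
--     call_symbol = None
--     put_symbol = None
--     for contract in contracts:
--         right = contract.get("right")
--         symbol = contract.get("option_symbol")
--         if call_symbol is None and right == "C" and _valid(symbol):
--             call_symbol = symbol
--         elif put_symbol is None and right == "P" and _valid(symbol):
--             put_symbol = symbol
--         if call_symbol is not None and put_symbol is not None:
--             break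
--     return call_symbol, put_symbol
-- ===== Notes on version B (the rewrite author's own statement) =====
-- stated objective: alternative
-- what changed: Replaced A's two independent generator scans over the contracts list with a single pass keeping call/put accumulators and breaking early once both are found.
import Mathlib
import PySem

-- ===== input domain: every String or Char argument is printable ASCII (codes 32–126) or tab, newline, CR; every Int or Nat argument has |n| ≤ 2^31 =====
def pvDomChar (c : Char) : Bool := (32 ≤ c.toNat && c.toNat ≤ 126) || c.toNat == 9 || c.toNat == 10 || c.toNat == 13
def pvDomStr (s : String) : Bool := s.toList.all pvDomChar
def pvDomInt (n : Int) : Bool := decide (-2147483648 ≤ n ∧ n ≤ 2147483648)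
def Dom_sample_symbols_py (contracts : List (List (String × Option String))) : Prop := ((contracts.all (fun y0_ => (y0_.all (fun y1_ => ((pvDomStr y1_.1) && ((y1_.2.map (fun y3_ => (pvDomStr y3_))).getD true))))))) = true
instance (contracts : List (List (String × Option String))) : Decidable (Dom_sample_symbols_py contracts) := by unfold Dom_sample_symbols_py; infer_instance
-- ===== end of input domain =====

-- B replaces A's two independent generator scans with one pass over the contracts carrying
-- call/put accumulators and an early break once both are found (alternative decomposition, same cost).


-- ===== PORT A =====
-- contract.get(key): first-match lookup in the association list, None when absent
def pvGet : List (String × Option String) → String → Option String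
  | [], _ => none
  | (k, v) :: rest, key => if k == key then v else pvGet rest key

-- _valid(symbol): bool(symbol) and str(symbol).lower() != "n/a"
def pvValid : Option String → Bool
  | none => false
  | some s => !(s == "") && !(PySem.Str.lower s == "n/a")

-- next((contract.get("option_symbol") for contract in contracts if … right == r and _valid …), None)
def pvFirstSym : List (List (String × Option String)) → String → Option String
  | [], _ => none
  | c :: rest, r =>
    if pvGet c "right" == some r && pvValid (pvGet c "option_symbol") then
      pvGet c "option_symbol"
    else
      pvFirstSym rest r

def sample_symbols_py (contracts : List (List (String × Option String))) : Option String × Option String :=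
  (pvFirstSym contracts "C", pvFirstSym contracts "P")

-- ===== PORT B =====
-- the for-loop of Source B: two accumulators, elif chain, break when both are set
def pvLoop : List (List (String × Option String)) → Option String → Option String → Option String × Option String
  | [], callS, putS => (callS, putS)
  | c :: rest, callS, putS =>
    let right := pvGet c "right"
    let symbol := pvGet c "option_symbol"
    if callS == none && right == some "C" && pvValid symbol then
      if symbol.isSome && putS.isSome then (symbol, putS) else pvLoop rest symbol putS
    else if putS == none && right == some "P" && pvValid symbol then
      if callS.isSome && symbol.isSome then (callS, symbol) else pvLoop rest callS symbol
    else
      if callS.isSome && putS.isSome then (callS, putS) else pvLoop rest callS putS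

def sample_symbols_py_alt (contracts : List (List (String × Option String))) : Option String × Option String :=
  pvLoop contracts none none

-- ===== PRECONDITION & SPEC =====
def Spec_sample_symbols_py (contracts : List (List (String × Option String))) (out : Option String × Option String) : Prop := out = sample_symbols_py_alt contracts
instance (contracts : List (List (String × Option String))) (out : Option String × Option String) : Decidable (Spec_sample_symbols_py contracts out) := by unfold Spec_sample_symbols_py; infer_instance

-- ===== CLAIM (what is proved, stated in full; the proofs are below) =====
def Claim_equal_sample_symbols_py : Prop := ∀ (contracts : List (List (String × Option String))), Dom_sample_symbols_py contracts → Spec_sample_symbols_py contracts (sample_symbols_py contracts)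

-- ===== LEMMAS AND PROOFS =====

lemma pvValid_isSome {s : Option String} (h : pvValid s = true) : s.isSome := by
  cases s <;> simp [pvValid] at h ⊢

-- loop invariant: the single pass with accumulators computes each side's first valid symbol,
-- with an already-set accumulator absorbing the rest of the scan
lemma pvLoop_eq (l : List (List (String × Option String))) :
    ∀ callS putS : Option String,
      pvLoop l callS putS =
        (callS.orElse (fun _ => pvFirstSym l "C"), putS.orElse (fun _ => pvFirstSym l "P")) := by
  induction l with
  | nil => intro c p; cases c <;> cases p <;> simp [pvLoop, pvFirstSym, Option.orElse]
  | cons x rest ih =>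
    intro c p
    simp only [pvLoop]
    by_cases hc : (c == none && (pvGet x "right" == some "C") && pvValid (pvGet x "option_symbol")) = true
    · have h3 : pvValid (pvGet x "option_symbol") = true := by simp_all [Bool.and_eq_true]
      have h2 : pvGet x "right" = some "C" := by simp_all [Bool.and_eq_true]
      have hcn : c = none := by cases c <;> simp_all
      obtain ⟨w, hw⟩ := Option.isSome_iff_exists.mp (pvValid_isSome h3)
      subst hcn
      rw [if_pos hc]
      have hFC : pvFirstSym (x :: rest) "C" = some w := by simp [pvFirstSym, h2, hw, hw ▸ h3]
      have hFP : pvFirstSym (x :: rest) "P" = pvFirstSym rest "P" := by simp [pvFirstSym, h2]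
      rw [hFC, hFP]
      cases p with
      | some v => simp [hw, Option.orElse]
      | none => simp [hw, ih, Option.orElse]
    · rw [if_neg hc]
      by_cases hp : (p == none && (pvGet x "right" == some "P") && pvValid (pvGet x "option_symbol")) = true
      · have h3 : pvValid (pvGet x "option_symbol") = true := by simp_all [Bool.and_eq_true]
        have h2 : pvGet x "right" = some "P" := by simp_all [Bool.and_eq_true]
        have hpn : p = none := by cases p <;> simp_all
        obtain ⟨w, hw⟩ := Option.isSome_iff_exists.mp (pvValid_isSome h3)
        subst hpn
        rw [if_pos hp]
        have hFP : pvFirstSym (x :: rest) "P" = some w := by simp [pvFirstSym, h2, hw, hw ▸ h3]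
        have hFC : pvFirstSym (x :: rest) "C" = pvFirstSym rest "C" := by simp [pvFirstSym, h2]
        rw [hFC, hFP]
        cases c with
        | some v => simp [hw, Option.orElse]
        | none => simp [hw, ih, Option.orElse]
      · rw [if_neg hp]
        -- neither branch fires: a matching head is absorbed by an already-set accumulator
        cases c with
        | none =>
          have hCf : ((pvGet x "right" == some "C") && pvValid (pvGet x "option_symbol")) = false := by
            simp_all
          cases p with
          | none =>
            have hPf : ((pvGet x "right" == some "P") && pvValid (pvGet x "option_symbol")) = false := by
              simp_all
            simp [pvFirstSym, hCf, hPf, ih, Option.orElse]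
          | some w =>
            simp [pvFirstSym, hCf, ih, Option.orElse]
        | some v =>
          cases p with
          | none =>
            have hPf : ((pvGet x "right" == some "P") && pvValid (pvGet x "option_symbol")) = false := by
              simp_all
            simp [pvFirstSym, hPf, ih, Option.orElse]
          | some w =>
            simp [Option.orElse]

-- ===== VERDICT (by name: the statement is the Claim_ definition above) =====
theorem sample_symbols_py_spec : Claim_equal_sample_symbols_py := by
  intro contracts _
  unfold Spec_sample_symbols_py sample_symbols_py sample_symbols_py_alt
  rw [pvLoop_eq]
  simp [Option.orElse]
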